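-- pv_equiv track=rewrite | github.com/ChrisLazaridis/TIC2024 | app.py | bytes_to_bits_with_header
-- ===== SOURCE A (Python) =====
-- def bytes_to_bits_with_header(byte_array):
--     # Get the header
--     header = byte_array[0]
--
--     # Get the bits from the byte array
--     bits = []
--     for i in range(1, len(byte_array)):
--         byte = byte_array[i]
--         for j in range(7, -1, -1):
--             bits.append((byte >> j) & 1)
--
--     # Remove the padding bits
--     if header < 8:
--         bits = bits[:-8 + header]
--
--     return bits
-- ===== SOURCE B (Python) =====
-- def bytes_to_bits_with_header(byte_array):
--     header = byte_array[0]
--     tail = byte_array[1:]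
--     # one big-integer conversion instead of a per-bit shift loop
--     n = int.from_bytes(bytes(b % 256 for b in tail), 'big')
--     total = 8 * len(tail)
--     bits = [int(c) for c in format(n, '0{}b'.format(total))] if total else []
--     if header < 8:
--         bits = bits[:-8 + header]
--     return bits
-- ===== Notes on version B (the rewrite author's own statement) =====
-- stated objective: idiomatic
-- what changed: Replaced the per-index nested shift-and-mask loop with a single big-integer conversion: the tail is packed into one int via int.from_bytes and expanded once with a fixed-width binary format string.
import Mathlib
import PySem

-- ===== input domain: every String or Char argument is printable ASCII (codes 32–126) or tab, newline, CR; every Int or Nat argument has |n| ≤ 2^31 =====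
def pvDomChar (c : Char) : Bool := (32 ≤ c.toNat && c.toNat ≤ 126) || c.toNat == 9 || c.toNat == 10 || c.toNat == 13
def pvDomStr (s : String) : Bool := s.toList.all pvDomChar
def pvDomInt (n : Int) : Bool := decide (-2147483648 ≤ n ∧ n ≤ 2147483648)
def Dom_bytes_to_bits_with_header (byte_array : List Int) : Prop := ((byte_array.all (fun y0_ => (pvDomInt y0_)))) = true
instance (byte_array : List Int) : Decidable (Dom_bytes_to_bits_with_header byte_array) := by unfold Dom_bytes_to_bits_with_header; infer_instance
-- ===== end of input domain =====

-- B replaces A's per-index, per-bit shift loop by one big-integer accumulation of the tail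
-- followed by a single fixed-width binary expansion (Python: int.from_bytes + format): alternative algorithm, same result.

-- ===== PORT A =====
def bytes_to_bits_with_header (byte_array : List Int) : List Int :=
  -- header = first element (IndexError on the empty list, excluded by Pre_; the default of pyGetD is never reached under Pre_)
  let header := PySem.List.pyGetD byte_array 0 0
  -- for i in range(1, len(byte_array)): byte = byte_array[i]; for j in range(7, -1, -1): bits.append((byte >> j) & 1)
  let bits := (PySem.List.pyRange 1 (byte_array.length : Int) 1).foldl
      (fun bits i =>
        let byte := PySem.List.pyGetD byte_array i 0
        (PySem.List.pyRange 7 (-1) (-1)).foldl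
          (fun bits j => bits ++ [PySem.Int.band (byte >>> j.toNat) 1]) bits)
      []
  -- if header < 8: bits = bits[:-8 + header]
  if header < 8 then PySem.List.slice bits none (some (-8 + header)) else bits

-- ===== PORT B =====
-- port of "[int(c) for c in format(n, '0{total}b')] if total else []": the total binary digits of n,
-- most significant first — exact here because B's n satisfies 0 ≤ n < 2^total
def pvPadBits (n : Int) : Nat → List Int
  | 0 => []
  | k + 1 => pvPadBits (PySem.Int.floordiv n 2) k ++ [PySem.Int.mod n 2]

def bytes_to_bits_with_header_alt (byte_array : List Int) : List Int :=
  let header := PySem.List.pyGetD byte_array 0 0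
  let tail := PySem.List.slice byte_array (some 1) none
  -- n = int.from_bytes(bytes(b % 256 for b in tail), 'big')
  let n := tail.foldl (fun n b => n * 256 + PySem.Int.mod b 256) 0
  let total := 8 * tail.length
  let bits := pvPadBits n total
  if header < 8 then PySem.List.slice bits none (some (-8 + header)) else bits

-- ===== PRECONDITION & SPEC =====
-- Pre_ excludes only the empty list, on which A raises IndexError at its first subscript (B raises there too).
def Pre_bytes_to_bits_with_header (byte_array : List Int) : Prop := byte_array ≠ []
instance (byte_array : List Int) : Decidable (Pre_bytes_to_bits_with_header byte_array) := by
  unfold Pre_bytes_to_bits_with_header; infer_instance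

def pvWitness_bytes_to_bits_with_header : List Int := [4, 255, 3]

def Spec_bytes_to_bits_with_header (byte_array : List Int) (out : List Int) : Prop := out = bytes_to_bits_with_header_alt byte_array
instance (byte_array : List Int) (out : List Int) : Decidable (Spec_bytes_to_bits_with_header byte_array out) := by unfold Spec_bytes_to_bits_with_header; infer_instance

-- ===== CLAIM (what is proved, stated in full; the proofs are below) =====
def Claim_equal_bytes_to_bits_with_header : Prop := ∀ (byte_array : List Int), Dom_bytes_to_bits_with_header byte_array → Pre_bytes_to_bits_with_header byte_array → Spec_bytes_to_bits_with_header byte_array (bytes_to_bits_with_header byte_array)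

-- ===== LEMMAS AND PROOFS =====

theorem pvFloordiv_two (n : Int) : PySem.Int.floordiv n 2 = n / 2 := by
  simp [PySem.Int.floordiv]; exact Int.fdiv_eq_ediv_of_nonneg _ (by norm_num)

theorem pvMod_two (n : Int) : PySem.Int.mod n 2 = n % 2 := by
  simp [PySem.Int.mod, Int.fmod_eq_emod]

theorem pvMod_256 (n : Int) : PySem.Int.mod n 256 = n % 256 := by
  simp [PySem.Int.mod, Int.fmod_eq_emod]

-- splitting a fixed-width binary expansion: top k bits of a, then the j bits of m
theorem pvPadBits_split (j : Nat) : ∀ (k : Nat) (a m : Int), 0 ≤ m → m < 2 ^ j →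
    pvPadBits (a * 2 ^ j + m) (k + j) = pvPadBits a k ++ pvPadBits m j := by
  induction j with
  | zero =>
    intro k a m h0 h1
    have hm : m = 0 := by omega
    subst hm; simp [pvPadBits]
  | succ j ih =>
    intro k a m h0 h1
    have e1 : a * 2 ^ (j + 1) + m = m + 2 * (a * 2 ^ j) := by ring
    have ediv : (a * 2 ^ (j + 1) + m) / 2 = a * 2 ^ j + m / 2 := by
      rw [e1, Int.add_mul_ediv_left _ _ (by norm_num)]; ring
    have emod : (a * 2 ^ (j + 1) + m) % 2 = m % 2 := by
      rw [e1, Int.add_mul_emod_self_left]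
    have hk : k + (j + 1) = (k + j) + 1 := by omega
    rw [hk]
    show pvPadBits (PySem.Int.floordiv (a * 2 ^ (j + 1) + m) 2) (k + j)
        ++ [PySem.Int.mod (a * 2 ^ (j + 1) + m) 2] = _
    rw [pvFloordiv_two, pvMod_two, ediv, emod,
        ih k a (m / 2) (by omega) (by
          have h2 : m < 2 * 2 ^ j := by rw [← pow_succ']; exact h1
          omega)]
    show _ = pvPadBits a k ++ (pvPadBits (PySem.Int.floordiv m 2) j ++ [PySem.Int.mod m 2])
    rw [pvFloordiv_two, pvMod_two, List.append_assoc]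

-- A's inner 8-step shift loop appends exactly the 8 binary digits of byte % 256
theorem pvBlock_eq (acc : List Int) (b : Int) :
    (PySem.List.pyRange 7 (-1) (-1)).foldl
        (fun bits j => bits ++ [PySem.Int.band (b >>> (j.toNat : Int)) 1]) acc
      = acc ++ pvPadBits (PySem.Int.mod b 256) 8 := by
  have hr : PySem.List.pyRange 7 (-1) (-1) = [7, 6, 5, 4, 3, 2, 1, 0] := by decide
  have hb : ∀ x : Int, PySem.Int.band x 1 = x % 2 := fun x => by
    rw [PySem.Int.band_one, pvMod_two]
  have hs7 : b >>> (((7:Int).toNat : Int)) = b / 128 := by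
    rw [Int.shiftRight_natCast_right, Int.shiftRight_eq_div_pow]; norm_num [show (7:Int).toNat = 7 from rfl]
  have hs6 : b >>> (((6:Int).toNat : Int)) = b / 64 := by
    rw [Int.shiftRight_natCast_right, Int.shiftRight_eq_div_pow]; norm_num [show (6:Int).toNat = 6 from rfl]
  have hs5 : b >>> (((5:Int).toNat : Int)) = b / 32 := by
    rw [Int.shiftRight_natCast_right, Int.shiftRight_eq_div_pow]; norm_num [show (5:Int).toNat = 5 from rfl]
  have hs4 : b >>> (((4:Int).toNat : Int)) = b / 16 := by
    rw [Int.shiftRight_natCast_right, Int.shiftRight_eq_div_pow]; norm_num [show (4:Int).toNat = 4 from rfl]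
  have hs3 : b >>> (((3:Int).toNat : Int)) = b / 8 := by
    rw [Int.shiftRight_natCast_right, Int.shiftRight_eq_div_pow]; norm_num [show (3:Int).toNat = 3 from rfl]
  have hs2 : b >>> (((2:Int).toNat : Int)) = b / 4 := by
    rw [Int.shiftRight_natCast_right, Int.shiftRight_eq_div_pow]; norm_num [show (2:Int).toNat = 2 from rfl]
  have hs1 : b >>> (((1:Int).toNat : Int)) = b / 2 := by
    rw [Int.shiftRight_natCast_right, Int.shiftRight_eq_div_pow]; norm_num [show (1:Int).toNat = 1 from rfl]
  have hs0 : b >>> (((0:Int).toNat : Int)) = b := by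
    rw [Int.shiftRight_natCast_right, Int.shiftRight_eq_div_pow]; norm_num [show (0:Int).toNat = 0 from rfl]
  rw [hr]
  simp only [List.foldl, hb, hs7, hs6, hs5, hs4, hs3, hs2, hs1, hs0,
    pvMod_256, pvPadBits, pvFloordiv_two, pvMod_two,
    List.append_assoc, List.nil_append, List.cons_append,
    List.append_cancel_left_eq, List.cons.injEq, and_true]
  omega

-- main loop correspondence, by induction on the tail from the right
theorem pvMain (t : List Int) (acc : List Int) :
    t.foldl
        (fun bits b =>
          (PySem.List.pyRange 7 (-1) (-1)).foldl
            (fun bits j => bits ++ [PySem.Int.band (b >>> (j.toNat : Int)) 1]) bits) acc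
      = acc ++ pvPadBits (t.foldl (fun n b => n * 256 + PySem.Int.mod b 256) 0) (8 * t.length) := by
  induction t using List.reverseRecOn generalizing acc with
  | nil => simp [pvPadBits]
  | append_singleton t b ih =>
    rw [List.foldl_append, List.foldl_append, ih]
    simp only [List.foldl]
    rw [pvBlock_eq]
    have hm0 : (0:Int) ≤ PySem.Int.mod b 256 := by rw [pvMod_256]; omega
    have hm1 : PySem.Int.mod b 256 < 2 ^ 8 := by rw [pvMod_256]; omega
    have hlen : 8 * (t ++ [b]).length = 8 * t.length + 8 := by
      simp [List.length_append]; omega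
    rw [hlen,
        show (t.foldl (fun n b => n * 256 + PySem.Int.mod b 256) 0) * 256 + PySem.Int.mod b 256
          = (t.foldl (fun n b => n * 256 + PySem.Int.mod b 256) 0) * 2 ^ 8 + PySem.Int.mod b 256 by norm_num,
        pvPadBits_split 8 (8 * t.length) _ _ hm0 hm1, List.append_assoc]

-- ===== VERDICT (by name: the statement is the Claim_ definition above) =====
theorem bytes_to_bits_with_header_spec : Claim_equal_bytes_to_bits_with_header := by
  intro byte_array _ _
  unfold Spec_bytes_to_bits_with_header
  simp only [bytes_to_bits_with_header, bytes_to_bits_with_header_alt,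
    PySem.List.slice_from_one]
  have houter := PySem.List.foldl_pyRange_pyGetD' (xs := byte_array) (a := 1) (d := (0:Int))
    (f := fun bits v =>
      (PySem.List.pyRange 7 (-1) (-1)).foldl
        (fun bits j => bits ++ [PySem.Int.band (v >>> (j.toNat : Int)) 1]) bits)
    (init := ([] : List Int)) (by norm_num)
  simp only at houter
  rw [houter, show byte_array.drop (1:Int).toNat = byte_array.tail from by simp,
      pvMain byte_array.tail []]
  simp
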